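-- pv_equiv track=rewrite | github.com/DIAG-Sapienza-BPM-Smart-Spaces/AdmPCrawler | unico_file_LLM.py | procedimenti_da_blocchi
-- ===== SOURCE A (Python) =====
-- def procedimenti_da_blocchi(blocchi, link_pdf, comune):
--
--     procedimenti = []
--     for blocco in blocchi:
--         nome_attivita = ""
--         righe = blocco.splitlines()
--         for r in righe:
--             if "procedimento" in r.lower():
--                 nome_attivita = r.strip()
--                 break
--         if not nome_attivita:
--             nome_attivita = righe[0].strip() if righe else "Procedimento"
--
--
--         normativa = next((r for r in righe if "art." in r.lower()), "")
--
--         riferimento = next((r for r in righe if "giorni" in r.lower()), "")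
--
--         procedimenti.append({
--             "Nome Attività": nome_attivita,
--             "Descrizione": blocco,
--             "Normativa": normativa,
--             "Riferimenti temporali": riferimento,
--             "Output": "",
--             "Link": link_pdf,
--             "Comune": comune
--         })
--
--     return procedimenti
-- ===== SOURCE B (Python) =====
-- def procedimenti_da_blocchi(blocchi, link_pdf, comune):
--     # Single pass per block: one loop over the lines fills all three fields
--     # (first match wins), instead of three separate scans.
--     procedimenti = []
--     for blocco in blocchi:
--         righe = blocco.splitlines()
--         nome = normativa = riferimento = None
--         for r in righe:
--             rl = r.lower()
--             if nome is None and "procedimento" in rl: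
--                 nome = r.strip()
--             if normativa is None and "art." in rl:
--                 normativa = r
--             if riferimento is None and "giorni" in rl:
--                 riferimento = r
--         if not nome:
--             nome = righe[0].strip() if righe else "Procedimento"
--         procedimenti.append({
--             "Nome Attività": nome,
--             "Descrizione": blocco,
--             "Normativa": normativa if normativa is not None else "",
--             "Riferimenti temporali": riferimento if riferimento is not None else "",
--             "Output": "",
--             "Link": link_pdf,
--             "Comune": comune
--         })
--     return procedimenti
-- ===== Notes on version B (the rewrite author's own statement) =====
-- stated objective: alternative
-- what changed: B replaces A's three separate scans over each block's lines (break-loop plus two next() generator scans) with a single pass per block that fills all three fields with first-match-wins semantics.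
import Mathlib
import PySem

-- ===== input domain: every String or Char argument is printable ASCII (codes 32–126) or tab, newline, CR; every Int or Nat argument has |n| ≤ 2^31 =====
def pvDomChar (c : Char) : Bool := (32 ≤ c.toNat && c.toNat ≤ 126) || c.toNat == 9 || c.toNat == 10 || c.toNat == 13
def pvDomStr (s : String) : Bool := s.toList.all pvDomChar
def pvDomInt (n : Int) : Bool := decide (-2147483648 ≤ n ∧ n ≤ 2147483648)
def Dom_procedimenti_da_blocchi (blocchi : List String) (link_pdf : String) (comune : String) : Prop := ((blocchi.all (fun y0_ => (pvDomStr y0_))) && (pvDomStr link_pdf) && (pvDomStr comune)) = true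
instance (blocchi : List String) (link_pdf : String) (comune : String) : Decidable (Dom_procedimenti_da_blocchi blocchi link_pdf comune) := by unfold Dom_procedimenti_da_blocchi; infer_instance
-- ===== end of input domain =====

-- B merges A's three separate scans over the lines of each block into one single
-- pass maintaining three first-match fields (objective: alternative / single pass).


-- ===== PORT A =====
-- one block of A's loop body: three separate scans over `righe`
def pvA_block (link_pdf comune blocco : String) : List (String × String) :=
  let righe := PySem.Str.splitlines blocco
  let nome0 := ((righe.find? (fun r => PySem.Str.isIn "procedimento" (PySem.Str.lower r))).map PySem.Str.strip).getD ""
  let nome_attivita := if nome0 == "" then (match righe with | [] => "Procedimento" | r0 :: _ => PySem.Str.strip r0) else nome0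
  let normativa := (righe.find? (fun r => PySem.Str.isIn "art." (PySem.Str.lower r))).getD ""
  let riferimento := (righe.find? (fun r => PySem.Str.isIn "giorni" (PySem.Str.lower r))).getD ""
  [("Nome Attività", nome_attivita), ("Descrizione", blocco), ("Normativa", normativa),
   ("Riferimenti temporali", riferimento), ("Output", ""), ("Link", link_pdf), ("Comune", comune)]

def procedimenti_da_blocchi (blocchi : List String) (link_pdf : String) (comune : String) : List (List (String × String)) :=
  blocchi.foldl (fun procedimenti blocco => procedimenti ++ [pvA_block link_pdf comune blocco]) []

-- ===== PORT B =====
-- one step of B's single pass: fill each of the three fields the first time its keyword appears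
def pvB_step (st : Option String × Option String × Option String) (r : String) : Option String × Option String × Option String :=
  let rl := PySem.Str.lower r
  ((if st.1.isNone && PySem.Str.isIn "procedimento" rl then some (PySem.Str.strip r) else st.1),
   (if st.2.1.isNone && PySem.Str.isIn "art." rl then some r else st.2.1),
   (if st.2.2.isNone && PySem.Str.isIn "giorni" rl then some r else st.2.2))

def pvB_block (link_pdf comune blocco : String) : List (String × String) :=
  let righe := PySem.Str.splitlines blocco
  let st := righe.foldl pvB_step (none, none, none)
  let nome0 := st.1.getD ""
  let nome := if nome0 == "" then (match righe with | [] => "Procedimento" | r0 :: _ => PySem.Str.strip r0) else nome0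
  [("Nome Attività", nome), ("Descrizione", blocco), ("Normativa", st.2.1.getD ""),
   ("Riferimenti temporali", st.2.2.getD ""), ("Output", ""), ("Link", link_pdf), ("Comune", comune)]

def procedimenti_da_blocchi_alt (blocchi : List String) (link_pdf : String) (comune : String) : List (List (String × String)) :=
  blocchi.map (pvB_block link_pdf comune)

-- ===== PRECONDITION & SPEC =====
def Spec_procedimenti_da_blocchi (blocchi : List String) (link_pdf : String) (comune : String) (out : List (List (String × String))) : Prop := out = procedimenti_da_blocchi_alt blocchi link_pdf comune
instance (blocchi : List String) (link_pdf : String) (comune : String) (out : List (List (String × String))) : Decidable (Spec_procedimenti_da_blocchi blocchi link_pdf comune out) := by unfold Spec_procedimenti_da_blocchi; infer_instance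

-- ===== CLAIM (what is proved, stated in full; the proofs are below) =====
def Claim_equal_procedimenti_da_blocchi : Prop := ∀ (blocchi : List String) (link_pdf : String) (comune : String), Dom_procedimenti_da_blocchi blocchi link_pdf comune → Spec_procedimenti_da_blocchi blocchi link_pdf comune (procedimenti_da_blocchi blocchi link_pdf comune)

-- ===== LEMMAS AND PROOFS =====
-- B's single pass computes the three first matches of A's separate scans
lemma pvB_fold_inv (righe : List String) (a b c : Option String) :
    righe.foldl pvB_step (a, b, c) =
      (a.or ((righe.find? (fun r => PySem.Str.isIn "procedimento" (PySem.Str.lower r))).map PySem.Str.strip),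
       b.or (righe.find? (fun r => PySem.Str.isIn "art." (PySem.Str.lower r))),
       c.or (righe.find? (fun r => PySem.Str.isIn "giorni" (PySem.Str.lower r)))) := by
  induction righe generalizing a b c with
  | nil => simp
  | cons r t ih =>
    simp only [List.foldl_cons, List.find?_cons]
    rw [show pvB_step (a, b, c) r =
        ((if a.isNone && PySem.Str.isIn "procedimento" (PySem.Str.lower r) then some (PySem.Str.strip r) else a),
         (if b.isNone && PySem.Str.isIn "art." (PySem.Str.lower r) then some r else b),
         (if c.isNone && PySem.Str.isIn "giorni" (PySem.Str.lower r) then some r else c)) from rfl]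
    rw [ih]
    cases hp : PySem.Str.isIn "procedimento" (PySem.Str.lower r) <;>
      cases ha : PySem.Str.isIn "art." (PySem.Str.lower r) <;>
      cases hg : PySem.Str.isIn "giorni" (PySem.Str.lower r) <;>
      cases a <;> cases b <;> cases c <;> simp_all [Option.or]

lemma pv_block_eq (link_pdf comune blocco : String) :
    pvA_block link_pdf comune blocco = pvB_block link_pdf comune blocco := by
  simp only [pvA_block, pvB_block, pvB_fold_inv, Option.none_or]

-- ===== VERDICT (by name: the statement is the Claim_ definition above) =====
theorem procedimenti_da_blocchi_spec : Claim_equal_procedimenti_da_blocchi := by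
  intro blocchi link_pdf comune _
  unfold Spec_procedimenti_da_blocchi procedimenti_da_blocchi procedimenti_da_blocchi_alt
  rw [PySem.List.foldl_append_singleton_eq_map]
  exact List.map_congr_left (fun b _ => pv_block_eq link_pdf comune b)
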